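-- pv_equiv track=rewrite | github.com/SimulatorK/ML | Assignment2/assignment_2.py | random_bit_match
-- ===== SOURCE A (Python) =====
-- def random_bit_match(state, mask):
--
--     total_value = 0
--     m = 0
--     for i, s in enumerate(state):
--         if s == mask[i]:
--             m += 1
--             total_value += m
--         else:
--             m = 0
--             total_value -= 0
--             total_value = max(total_value,0)
--     for i, s in enumerate(state[::-1]):
--         if s == mask[-i]:
--             m += 1
--             total_value += m
--         else:
--             m = 0
--             total_value -= 0
--             total_value = max(total_value,0)
--
--
--
--     return total_value
-- ===== SOURCE B (Python) =====
-- def random_bit_match(state, mask):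
--     # A's score equals the number of contiguous intervals of the combined
--     # comparison sequence that consist entirely of matches; count those
--     # intervals directly with a start/extend nested scan.
--     seq = [state[i] == mask[i] for i in range(len(state))]
--     rev = state[::-1]
--     seq += [rev[i] == mask[-i] for i in range(len(state))]
--     total = 0
--     for start in range(len(seq)):
--         j = start
--         while j < len(seq) and seq[j]:
--             total += 1
--             j += 1
--     return total
-- ===== Notes on version B (the rewrite author's own statement) =====
-- stated objective: alternative
-- what changed: B counts, with a nested start/extend scan over the combined match-indicator sequence, the number of contiguous intervals made entirely of matches (this count equals A's score), replacing A's single-pass incremental run accumulator.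
import Mathlib
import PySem

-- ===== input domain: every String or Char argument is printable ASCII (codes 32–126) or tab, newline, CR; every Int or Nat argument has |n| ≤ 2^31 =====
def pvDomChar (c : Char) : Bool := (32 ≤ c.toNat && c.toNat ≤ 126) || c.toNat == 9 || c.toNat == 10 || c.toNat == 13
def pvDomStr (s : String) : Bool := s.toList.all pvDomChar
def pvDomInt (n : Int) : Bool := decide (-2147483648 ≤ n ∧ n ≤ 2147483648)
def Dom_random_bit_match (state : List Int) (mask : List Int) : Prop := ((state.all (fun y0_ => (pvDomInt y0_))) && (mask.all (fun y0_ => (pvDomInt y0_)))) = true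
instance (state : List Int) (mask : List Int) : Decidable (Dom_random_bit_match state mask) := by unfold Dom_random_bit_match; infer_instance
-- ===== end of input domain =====

-- B counts fully-matching contiguous intervals of the combined indicator sequence with a nested
-- start/extend scan instead of A's incremental run accumulator (objective: alternative algorithm).

-- ===== PORT A =====
-- first loop: for i, s in enumerate(state): compare s with mask[i] (IndexError → none)
def aLoop1 (mask : List Int) : List (Int × Int) → Int × Int → Option (Int × Int)
  | [], st => some st
  | (i, s) :: rest, (t, m) =>
    match PySem.List.pyGet? mask i with
    | none => none
    | some v =>
      if s = v then aLoop1 mask rest (t + (m + 1), m + 1)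
      else aLoop1 mask rest (max (t - 0) 0, 0)

-- second loop: for i, s in enumerate(state[::-1]): compare s with mask[-i]
def aLoop2 (mask : List Int) : List (Int × Int) → Int × Int → Option (Int × Int)
  | [], st => some st
  | (i, s) :: rest, (t, m) =>
    match PySem.List.pyGet? mask (-i) with
    | none => none
    | some v =>
      if s = v then aLoop2 mask rest (t + (m + 1), m + 1)
      else aLoop2 mask rest (max (t - 0) 0, 0)

def random_bit_match (state : List Int) (mask : List Int) : Int :=
  match aLoop1 mask (PySem.List.enumerate state 0) (0, 0) with
  | none => 0
  | some st =>
    match PySem.List.slice? state none none (-1) with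
    | none => 0
    | some rev =>
      match aLoop2 mask (PySem.List.enumerate rev 0) st with
      | none => 0
      | some st2 => st2.1

-- ===== PORT B =====
-- [state[i] == mask[i] for i in range(len(state))]
def bBits1 (state mask : List Int) : Option (List Bool) :=
  (PySem.List.pyRange 0 state.length 1).mapM fun i =>
    (PySem.List.pyGet? state i).bind fun s =>
      (PySem.List.pyGet? mask i).map fun v => decide (s = v)

-- [rev[i] == mask[-i] for i in range(len(state))] with rev = state[::-1]
def bBits2 (state mask : List Int) : Option (List Bool) :=
  (PySem.List.pyRange 0 state.length 1).mapM fun i =>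
    (PySem.List.pyGet? state.reverse i).bind fun s =>
      (PySem.List.pyGet? mask (-i)).map fun v => decide (s = v)

-- inner while: scan forward from the start while the indicators stay true, adding 1 each step
def bRun : List Bool → Int
  | [] => 0
  | b :: bs => if b then 1 + bRun bs else 0

-- outer loop: one inner scan per start position (per suffix of the sequence)
def bScore : List Bool → Int
  | [] => 0
  | b :: bs => bRun (b :: bs) + bScore bs

def random_bit_match_alt (state : List Int) (mask : List Int) : Int :=
  match bBits1 state mask, bBits2 state mask with
  | some b1, some b2 => bScore (b1 ++ b2)
  | _, _ => 0

-- ===== PRECONDITION & SPEC =====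
-- A raises IndexError exactly when len(state) > len(mask) (mask[i] in the first loop); excluded.
def Pre_random_bit_match (state : List Int) (mask : List Int) : Prop :=
  state.length ≤ mask.length
instance (state : List Int) (mask : List Int) : Decidable (Pre_random_bit_match state mask) := by
  unfold Pre_random_bit_match; infer_instance

def pvWitness_random_bit_match : List Int × List Int := ([1, 0, 1], [1, 1, 1])

def Spec_random_bit_match (state : List Int) (mask : List Int) (out : Int) : Prop := out = random_bit_match_alt state mask
instance (state : List Int) (mask : List Int) (out : Int) : Decidable (Spec_random_bit_match state mask out) := by unfold Spec_random_bit_match; infer_instance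

-- ===== CLAIM (what is proved, stated in full; the proofs are below) =====
def Claim_equal_random_bit_match : Prop := ∀ (state : List Int) (mask : List Int), Dom_random_bit_match state mask → Pre_random_bit_match state mask → Spec_random_bit_match state mask (random_bit_match state mask)

-- ===== LEMMAS AND PROOFS =====

-- pure model of A's loop body over a list of match indicators
def fA : List Bool → Int × Int → Int × Int
  | [], st => st
  | b :: bs, (t, m) => if b then fA bs (t + (m + 1), m + 1) else fA bs (max (t - 0) 0, 0)

lemma fA_cons_true (bs : List Bool) (t m : Int) :
    fA (true :: bs) (t, m) = fA bs (t + (m + 1), m + 1) := rfl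

lemma fA_cons_false (bs : List Bool) (t m : Int) :
    fA (false :: bs) (t, m) = fA bs (max (t - 0) 0, 0) := rfl

lemma fA_append (xs ys : List Bool) (st : Int × Int) :
    fA (xs ++ ys) st = fA ys (fA xs st) := by
  induction xs generalizing st with
  | nil => rfl
  | cons b bs ih =>
    obtain ⟨t, m⟩ := st
    cases b
    · rw [List.cons_append, fA_cons_false, fA_cons_false, ih]
    · rw [List.cons_append, fA_cons_true, fA_cons_true, ih]

-- core: A's accumulator equals the interval count, offset by the intervals reaching back
-- into a virtual run of m matches preceding bs
lemma core (bs : List Bool) : ∀ t m : Int, 0 ≤ t → 0 ≤ m →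
    (fA bs (t, m)).1 = t + bScore bs + m * bRun bs := by
  induction bs with
  | nil => intro t m _ _; simp [fA, bScore, bRun]
  | cons b bs ih =>
    intro t m ht hm
    cases b
    · have hmax : max (t - 0) 0 = t := by omega
      rw [fA_cons_false, hmax, ih t 0 ht le_rfl]
      simp [bScore, bRun]
    · rw [fA_cons_true, ih (t + (m + 1)) (m + 1) (by omega) (by omega)]
      simp only [bScore, bRun, if_true]
      ring

-- generic: List.mapM over Option succeeds pointwise
lemma mapM_eq_some_map {α β : Type} (f : α → Option β) (g : α → β) :
    ∀ l : List α, (∀ a ∈ l, f a = some (g a)) → l.mapM f = some (l.map g) := by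
  intro l
  induction l with
  | nil => intro _; rfl
  | cons a l ih =>
    intro h
    have ha := h a (List.mem_cons_self ..)
    have ht := ih (fun x hx => h x (List.mem_cons_of_mem _ hx))
    simp [List.mapM_cons, ha, ht]

-- A's first loop succeeds and computes fA of the indicator list, when every index is in range
lemma aLoop1_bridge (mask : List Int) (l : List (Int × Int))
    (h : ∀ p ∈ l, (PySem.List.pyGet? mask p.1).isSome) :
    ∀ st, aLoop1 mask l st =
      some (fA (l.map (fun p => decide (p.2 = (PySem.List.pyGet? mask p.1).getD 0))) st) := by
  induction l with
  | nil => intro st; rfl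
  | cons p rest ih =>
    intro st
    obtain ⟨i, s⟩ := p
    obtain ⟨t, m⟩ := st
    obtain ⟨v, hv⟩ := Option.isSome_iff_exists.mp (h (i, s) (List.mem_cons_self ..))
    have hrest : ∀ q ∈ rest, (PySem.List.pyGet? mask q.1).isSome :=
      fun q hq => h q (List.mem_cons_of_mem _ hq)
    by_cases hs : s = v <;>
      simp [aLoop1, hv, hs, fA, ih hrest]

-- same for A's second loop (negated index)
lemma aLoop2_bridge (mask : List Int) (l : List (Int × Int))
    (h : ∀ p ∈ l, (PySem.List.pyGet? mask (-p.1)).isSome) :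
    ∀ st, aLoop2 mask l st =
      some (fA (l.map (fun p => decide (p.2 = (PySem.List.pyGet? mask (-p.1)).getD 0))) st) := by
  induction l with
  | nil => intro st; rfl
  | cons p rest ih =>
    intro st
    obtain ⟨i, s⟩ := p
    obtain ⟨t, m⟩ := st
    obtain ⟨v, hv⟩ := Option.isSome_iff_exists.mp (h (i, s) (List.mem_cons_self ..))
    have hrest : ∀ q ∈ rest, (PySem.List.pyGet? mask (-q.1)).isSome :=
      fun q hq => h q (List.mem_cons_of_mem _ hq)
    by_cases hs : s = v <;>
      simp [aLoop2, hv, hs, fA, ih hrest]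

-- ===== VERDICT (by name: the statement is the Claim_ definition above) =====
theorem random_bit_match_spec : Claim_equal_random_bit_match := by
  intro state mask _ hpre
  unfold Spec_random_bit_match
  have hlen : state.length ≤ mask.length := hpre
  -- the two indicator lists, as A's loops see them
  have h1 : ∀ p ∈ PySem.List.enumerate state 0, (PySem.List.pyGet? mask p.1).isSome := by
    intro p hp
    obtain ⟨k, hk, rfl⟩ := (PySem.List.mem_enumerate_iff state 0 p).mp hp
    have hz : (0 : Int) + (k : Int) = (k : Int) := by ring
    rw [hz, PySem.List.pyGet?_natCast, List.getElem?_eq_getElem (by omega : k < mask.length)]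
    rfl
  have h2 : ∀ p ∈ PySem.List.enumerate state.reverse 0, (PySem.List.pyGet? mask (-p.1)).isSome := by
    intro p hp
    obtain ⟨k, hk, rfl⟩ := (PySem.List.mem_enumerate_iff state.reverse 0 p).mp hp
    have hk' : k < state.length := by simpa using hk
    by_cases hk0 : k = 0
    · subst hk0
      have hz : -((0 : Int) + ((0 : Nat) : Int)) = 0 := by norm_num
      rw [hz, PySem.List.pyGet?_zero, List.getElem?_eq_getElem (by omega : 0 < mask.length)]
      rfl
    · have hz : -((0 : Int) + (k : Int)) = -(k : Int) := by ring
      rw [hz, PySem.List.pyGet?_neg_natCast mask k (by omega) (by omega),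
          List.getElem?_eq_getElem (by omega : mask.length - k < mask.length)]
      rfl
  -- A computes fA over the concatenated indicator list
  have hA : random_bit_match state mask =
      (fA ((PySem.List.enumerate state 0).map
            (fun p => decide (p.2 = (PySem.List.pyGet? mask p.1).getD 0)) ++
           (PySem.List.enumerate state.reverse 0).map
            (fun p => decide (p.2 = (PySem.List.pyGet? mask (-p.1)).getD 0))) (0, 0)).1 := by
    unfold random_bit_match
    simp only [aLoop1_bridge mask _ h1, PySem.List.slice?_none_none_neg_one,
      aLoop2_bridge mask _ h2, fA_append]
  -- B's two comprehensions succeed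
  have hb1 : bBits1 state mask = some ((PySem.List.pyRange 0 state.length 1).map
      (fun i => decide ((PySem.List.pyGet? state i).getD 0 = (PySem.List.pyGet? mask i).getD 0))) := by
    unfold bBits1
    apply mapM_eq_some_map
    intro i hi
    obtain ⟨hi0, hin⟩ := PySem.List.mem_pyRange_one.mp hi
    rw [PySem.List.pyGet?_eq_some_getElem state hi0 (by omega),
        PySem.List.pyGet?_eq_some_getElem mask hi0 (by omega)]
    rfl
  have hb2 : bBits2 state mask = some ((PySem.List.pyRange 0 state.length 1).map
      (fun i => decide ((PySem.List.pyGet? state.reverse i).getD 0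
                        = (PySem.List.pyGet? mask (-i)).getD 0))) := by
    unfold bBits2
    apply mapM_eq_some_map
    intro i hi
    obtain ⟨hi0, hin⟩ := PySem.List.mem_pyRange_one.mp hi
    have hm : (PySem.List.pyGet? mask (-i)).isSome := by
      by_cases hz : i = 0
      · subst hz
        rw [neg_zero, PySem.List.pyGet?_zero, List.getElem?_eq_getElem (by omega : 0 < mask.length)]
        rfl
      · have hi' : i = ((i.toNat : Nat) : Int) := by omega
        rw [hi', PySem.List.pyGet?_neg_natCast mask i.toNat (by omega) (by omega),
            List.getElem?_eq_getElem (by omega : mask.length - i.toNat < mask.length)]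
        rfl
    obtain ⟨v, hv⟩ := Option.isSome_iff_exists.mp hm
    rw [PySem.List.pyGet?_eq_some_getElem state.reverse hi0 (by simpa using hin), hv]
    rfl
  -- B's first indicator list is A's
  have hL1 : (PySem.List.pyRange 0 state.length 1).map
      (fun i => decide ((PySem.List.pyGet? state i).getD 0 = (PySem.List.pyGet? mask i).getD 0)) =
      (PySem.List.enumerate state 0).map
      (fun p => decide (p.2 = (PySem.List.pyGet? mask p.1).getD 0)) := by
    rw [PySem.List.enumerate_eq_map_pyRange state 0, List.map_map]
    have hlen' : PySem.List.len state = (state.length : Int) := by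
      simp [PySem.List.len]
    rw [hlen']
    apply List.map_congr_left
    intro i hi
    obtain ⟨hi0, hin⟩ := PySem.List.mem_pyRange_one.mp hi
    simp only [Function.comp]
    have e1 : PySem.List.pyGetD state i 0 = (PySem.List.pyGet? state i).getD 0 := by
      rw [PySem.List.pyGetD_eq_getElem state 0 hi0 (by omega),
          PySem.List.pyGet?_eq_some_getElem state hi0 (by omega)]
      rfl
    simp only [e1]
  -- B's second indicator list is A's
  have hL2 : (PySem.List.pyRange 0 state.length 1).map
      (fun i => decide ((PySem.List.pyGet? state.reverse i).getD 0
                        = (PySem.List.pyGet? mask (-i)).getD 0)) =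
      (PySem.List.enumerate state.reverse 0).map
      (fun p => decide (p.2 = (PySem.List.pyGet? mask (-p.1)).getD 0)) := by
    rw [PySem.List.enumerate_eq_map_pyRange state.reverse 0, List.map_map]
    have hlen' : PySem.List.len state.reverse = (state.length : Int) := by
      simp [PySem.List.len]
    rw [hlen']
    apply List.map_congr_left
    intro i hi
    obtain ⟨hi0, hin⟩ := PySem.List.mem_pyRange_one.mp hi
    simp only [Function.comp]
    have e2 : PySem.List.pyGetD state.reverse i 0 = (PySem.List.pyGet? state.reverse i).getD 0 := by
      rw [PySem.List.pyGetD_eq_getElem state.reverse 0 hi0 (by simpa using hin),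
          PySem.List.pyGet?_eq_some_getElem state.reverse hi0 (by simpa using hin)]
      rfl
    simp only [e2]
  -- put it together via the interval-count lemma
  rw [hA]
  simp only [random_bit_match_alt, hb1, hb2, hL1, hL2]
  rw [core _ 0 0 le_rfl le_rfl]
  ring
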